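-- pv_equiv track=rewrite | github.com/RyanCHolder/LifeAdapt-Activity-Recognition-and-Detection-Framework | metrics.py | get_activity_intervals
-- ===== SOURCE A (Python) =====
-- def get_activity_intervals(labels):
--     """
--     Converts a list of labels into intervals of continuous activities.
--
--     Args:
--         labels: List of activity labels.
--
--     Returns:
--         intervals_dict: Dictionary with activity labels as keys and lists of (start, end) intervals.
--     """
--     intervals_dict = {}
--     current_label = labels[0]
--     start_idx = 0
--
--     for i in range(1, len(labels)):
--         if labels[i] != current_label:
--             # Create an interval for the previous label
--             end_idx = i-1
--             if current_label not in intervals_dict: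
--                 intervals_dict[current_label] = []
--             intervals_dict[current_label].append((start_idx, end_idx))
--
--             # Update the current label and start index
--             current_label = labels[i]
--             start_idx = i
--
--     # Append the final interval
--     end_idx = len(labels) - 1
--     if current_label not in intervals_dict:
--         intervals_dict[current_label] = []
--     intervals_dict[current_label].append((start_idx, end_idx))
--
--     return intervals_dict
-- ===== SOURCE B (Python) =====
-- def get_activity_intervals(labels):
--     # Stage 1: inverted index -- every index at which each label occurs, in order.
--     positions = {}
--     for i, lab in enumerate(labels):
--         positions.setdefault(lab, []).append(i)
--     # Stage 2: per label, split its (sorted) index list into maximal consecutive runs.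
--     intervals_dict = {}
--     for lab, idxs in positions.items():
--         ivs = []
--         start = prev = idxs[0]
--         for j in idxs[1:]:
--             if j != prev + 1:
--                 ivs.append((start, prev))
--                 start = j
--             prev = j
--         ivs.append((start, prev))
--         intervals_dict[lab] = ivs
--     return intervals_dict
-- ===== Notes on version B (the rewrite author's own statement) =====
-- stated objective: alternative
-- what changed: Replaces A's single-pass boundary-comparison loop over the label sequence by a two-stage algorithm: first build an inverted index mapping each label to all of its occurrence indices, then split each label's index list into maximal runs of consecutive indices to recover its intervals.
import Mathlib
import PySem

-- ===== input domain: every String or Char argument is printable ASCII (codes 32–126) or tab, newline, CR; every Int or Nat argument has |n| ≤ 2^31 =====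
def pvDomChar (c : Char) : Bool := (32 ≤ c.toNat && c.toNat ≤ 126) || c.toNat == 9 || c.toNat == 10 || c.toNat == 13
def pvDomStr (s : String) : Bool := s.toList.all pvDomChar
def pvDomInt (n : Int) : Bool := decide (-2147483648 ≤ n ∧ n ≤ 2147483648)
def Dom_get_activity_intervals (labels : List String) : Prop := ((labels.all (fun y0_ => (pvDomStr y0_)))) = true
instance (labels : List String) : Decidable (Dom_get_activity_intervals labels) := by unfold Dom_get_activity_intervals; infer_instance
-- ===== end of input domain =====

-- B replaces A's single boundary-comparison pass by a two-stage algorithm: build an inverted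
-- index (label -> all occurrence indices), then split each label's index list into maximal
-- consecutive runs; alternative decomposition, not claimed faster.


-- ===== PORT A =====
-- helper: one iteration of A's `for i in range(1, len(labels))` loop over state
-- (intervals_dict, current_label, start_idx); labels[i] is in range for every i the loop
-- visits, so `.getD ""` is never the default inside the loop.
def pvAStep (labels : List String)
    (st : PySem.Dict String (List (Int × Int)) × String × Int) (i : Int) :
    PySem.Dict String (List (Int × Int)) × String × Int :=
  let (d, cur, start) := st
  if (PySem.List.pyGet? labels i).getD "" ≠ cur then
    let d := if d.contains cur then d else d.insert cur []
    let d := d.modify cur [] (fun l => l ++ [(start, i - 1)])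
    (d, (PySem.List.pyGet? labels i).getD "", i)
  else
    st

def get_activity_intervals (labels : List String) : List (String × List (Int × Int)) :=
  let cur0 := (PySem.List.pyGet? labels 0).getD ""   -- labels[0]; IndexError on [] excluded by Pre_
  let st := (PySem.List.pyRange 1 (labels.length : Int) 1).foldl (pvAStep labels)
      (PySem.Dict.empty, cur0, 0)
  let (d, cur, start) := st
  let d := if d.contains cur then d else d.insert cur []
  let d := d.modify cur [] (fun l => l ++ [(start, (labels.length : Int) - 1)])
  d.items

-- ===== PORT B =====
-- stage-1 loop body: positions.setdefault(lab, []).append(i)  (p = (i, lab) from enumerate)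
def pvPosStep (d : PySem.Dict String (List Int)) (p : Int × String) : PySem.Dict String (List Int) :=
  (d.setdefault p.2 []).modify p.2 [] (fun l => l ++ [p.1])

-- stage-2 inner loop over idxs[1:], state (ivs, start, prev); final append at []
def pvGroupAux (ivs : List (Int × Int)) (start prev : Int) : List Int → List (Int × Int)
  | [] => ivs ++ [(start, prev)]
  | j :: rest =>
    if j ≠ prev + 1 then pvGroupAux (ivs ++ [(start, prev)]) j j rest
    else pvGroupAux ivs start j rest

-- idxs[0] / idxs[1:]; a positions value is never [] (every key is inserted with an index),
-- so the [] branch is unreachable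
def pvGroup : List Int → List (Int × Int)
  | [] => []
  | j :: rest => pvGroupAux [] j j rest

def get_activity_intervals_alt (labels : List String) : List (String × List (Int × Int)) :=
  let positions := (PySem.List.enumerate labels 0).foldl pvPosStep PySem.Dict.empty
  (positions.items.foldl (fun d kv => d.insert kv.1 (pvGroup kv.2)) PySem.Dict.empty).items

-- ===== PRECONDITION & SPEC =====
-- Pre_ excludes only the empty list, on which A raises IndexError at labels[0].
def Pre_get_activity_intervals (labels : List String) : Prop := labels ≠ []
instance (labels : List String) : Decidable (Pre_get_activity_intervals labels) := by
  unfold Pre_get_activity_intervals; infer_instance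
def pvWitness_get_activity_intervals : List String := ["walk", "walk", "run"]

def Spec_get_activity_intervals (labels : List String) (out : List (String × List (Int × Int))) : Prop := out = get_activity_intervals_alt labels
instance (labels : List String) (out : List (String × List (Int × Int))) : Decidable (Spec_get_activity_intervals labels out) := by unfold Spec_get_activity_intervals; infer_instance

-- ===== CLAIM (what is proved, stated in full; the proofs are below) =====
def Claim_equal_get_activity_intervals : Prop := ∀ (labels : List String), Dom_get_activity_intervals labels → Pre_get_activity_intervals labels → Spec_get_activity_intervals labels (get_activity_intervals labels)

-- ===== LEMMAS AND PROOFS =====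

-- modify on a freshly inserted empty entry is modify on the original dict
theorem pv_insert_modify {ν : Type} (d : PySem.Dict String (List ν)) (k : String)
    (f : List ν → List ν) (h : d.contains k = false) :
    (d.insert k []).modify k [] f = d.modify k [] f := by
  have hA : (d.items.any fun p => p.1 == k) = false := by
    simpa only [PySem.Dict.contains] using h
  have hne : ∀ p ∈ d.items, ¬ p.1 = k := by
    intro p hp hc
    rw [List.any_eq_false] at hA
    exact absurd (by simpa using hc) (by simpa using hA p hp)
  have hf : List.find? (fun p => p.1 == k) d.items = none := by
    rw [List.find?_eq_none]; intro p hp; simpa using hne p hp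
  simp only [PySem.Dict.modify, PySem.Dict.insert, PySem.Dict.getD,
    PySem.Dict.get?, PySem.Dict.contains, hA, if_false, Bool.false_eq_true, List.any_append,
    List.find?_append, hf]
  simp [List.map_append, List.map_congr_left (fun p hp => if_neg (hne p hp))]

-- `setdefault(k, []); d[k] = d[k] + [t]` is a plain modify
theorem pv_sd_modify {ν : Type} (d : PySem.Dict String (List ν)) (k : String) (f : List ν → List ν) :
    (d.setdefault k []).modify k [] f = d.modify k [] f := by
  by_cases h : d.contains k
  · rw [PySem.Dict.setdefault_of_contains _ _ h]
  · rw [PySem.Dict.setdefault_of_not_contains _ _ (eq_false_of_ne_true h),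
      pv_insert_modify _ _ _ (eq_false_of_ne_true h)]

-- A's `if cur not in d: d[cur] = []` followed by append is the same modify
theorem pv_flushA {ν : Type} (d : PySem.Dict String (List ν)) (k : String) (f : List ν → List ν) :
    ((if d.contains k then d else d.insert k []).modify k [] f) = d.modify k [] f := by
  by_cases h : d.contains k
  · simp [h]
  · rw [if_neg (by simp [h]), pv_insert_modify _ _ _ (eq_false_of_ne_true h)]

-- the common group-by fold both stages reduce to
def pvG {β : Type} (ps : List (String × β)) : PySem.Dict String (List β) :=
  ps.foldl (fun d p => d.modify p.1 [] (fun l => l ++ [p.2])) PySem.Dict.empty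

theorem pvG_items {β : Type} (ps : List (String × β)) :
    (pvG ps).items = (PySem.Set.ofList (ps.map (·.1))).map
      (fun k => (k, (ps.filter (fun p => p.1 == k)).map (·.2))) := by
  have hnd : (pvG ps).keys.Nodup := by
    apply PySem.Dict.nodup_keys_foldl_modify_key ps (fun p => p.1) [] (fun _ p l => l ++ [p.2])
    simp [PySem.Dict.keys, PySem.Dict.empty]
  have hkeys : (pvG ps).keys = PySem.Set.ofList (ps.map (·.1)) := by
    have := PySem.Dict.keys_foldl_modify_key ps (fun p => p.1) [] (fun _ p l => l ++ [p.2]) PySem.Dict.empty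
    unfold pvG
    rw [this]
    simp [PySem.Dict.keys, PySem.Dict.empty, PySem.Set.update, PySem.Set.ofList]
  rw [PySem.Dict.items_eq_map_keys _ hnd [], hkeys]
  apply List.map_congr_left
  intro k hk
  have := PySem.Dict.getD_foldl_modify_append ps PySem.Dict.empty k
  unfold pvG
  rw [this]
  simp [PySem.Dict.getD, PySem.Dict.get?, PySem.Dict.empty]

-- ---- run structure of the label list (proof-side only) ----
def pvRunsAux : String → Nat → List String → List (String × Nat)
  | k, c, [] => [(k, c)]
  | k, c, x :: xs => if x = k then pvRunsAux k (c + 1) xs else (k, c) :: pvRunsAux x 1 xs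

def pvExpand (rs : List (String × Nat)) : List String :=
  rs.flatMap (fun p => List.replicate p.2 p.1)

def pvIvsOf : Int → List (String × Nat) → List (String × (Int × Int))
  | _, [] => []
  | idx, (k, n) :: rs => (k, (idx, idx + n - 1)) :: pvIvsOf (idx + (n : Int)) rs

def pvIdxsOf (k : String) : Int → List (String × Nat) → List Int
  | _, [] => []
  | idx, (k', n) :: rs =>
    (if k' = k then (List.range n).map (fun (j : Nat) => idx + (j : Int)) else []) ++ pvIdxsOf k (idx + (n : Int)) rs

-- A's loop as structural recursion on the suffix of labels
def pvALoop : List String → PySem.Dict String (List (Int × Int)) → String → Int → Int →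
    PySem.Dict String (List (Int × Int)) × String × Int
  | [], d, cur, start, _ => (d, cur, start)
  | x :: xs, d, cur, start, i =>
    if x ≠ cur then pvALoop xs (d.modify cur [] (fun l => l ++ [(start, i - 1)])) x i (i + 1)
    else pvALoop xs d cur start (i + 1)

theorem pvAStep_eq (labels : List String) (d : PySem.Dict String (List (Int × Int)))
    (cur : String) (start : Int) (j : Nat) (hj : j < labels.length) :
    pvAStep labels (d, cur, start) (j : Int)
      = if labels[j] ≠ cur then
          (d.modify cur [] (fun l => l ++ [(start, (j : Int) - 1)]), labels[j], (j : Int))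
        else (d, cur, start) := by
  have hg : (PySem.List.pyGet? labels (j : Int)).getD "" = labels[j] := by
    simp [pysem, List.getElem?_eq_getElem hj]
  simp only [pvAStep, hg]
  split_ifs with h hc
  · rfl
  · rw [pv_insert_modify _ _ _ (eq_false_of_ne_true hc)]
  · rfl

theorem pvALoop_eq_foldl (labels : List String) :
    ∀ (j : Nat), j ≤ labels.length →
    ∀ (d : PySem.Dict String (List (Int × Int))) (cur : String) (start : Int),
    (PySem.List.pyRange (j : Int) (labels.length : Int) 1).foldl (pvAStep labels) (d, cur, start)
      = pvALoop (labels.drop j) d cur start (j : Int) := by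
  intro j hj
  induction hn : labels.length - j generalizing j with
  | zero =>
    intro d cur start
    have hje : j = labels.length := by omega
    subst hje
    rw [PySem.List.pyRange_one_eq_nil (le_refl _)]
    simp [pvALoop]
  | succ n ih =>
    intro d cur start
    have hjl : j < labels.length := by omega
    rw [PySem.List.pyRange_one_cons (by exact_mod_cast hjl)]
    simp only [List.foldl_cons]
    rw [pvAStep_eq labels d cur start j hjl]
    rw [List.drop_eq_getElem_cons hjl]
    simp only [pvALoop]
    rw [show ((j : Int) + 1) = ((j + 1 : Nat) : Int) by push_cast; ring]
    split_ifs with h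
    · rw [ih (j + 1) (by omega) (by omega)]
    · rw [ih (j + 1) (by omega) (by omega)]

-- main invariant: A's remaining loop + final flush = the group-by fold over the intervals of
-- the remaining runs
theorem pvMainA (xs : List String) :
    ∀ (d : PySem.Dict String (List (Int × Int))) (cur : String) (start : Int) (c : Nat),
    ((pvALoop xs d cur start (start + c)).1.modify (pvALoop xs d cur start (start + c)).2.1 []
        (fun l => l ++ [((pvALoop xs d cur start (start + c)).2.2, start + c + (xs.length : Int) - 1)]))
      = (pvIvsOf start (pvRunsAux cur c xs)).foldl
          (fun d p => d.modify p.1 [] (fun l => l ++ [p.2])) d := by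
  induction xs with
  | nil =>
    intro d cur start c
    simp [pvALoop, pvRunsAux, pvIvsOf]
  | cons x t ih =>
    intro d cur start c
    by_cases h : x = cur
    · subst h
      have e1 : pvALoop (x :: t) d x start (start + c) = pvALoop t d x start (start + c + 1) := by
        simp [pvALoop]
      have e2 : pvRunsAux x c (x :: t) = pvRunsAux x (c + 1) t := by
        simp [pvRunsAux]
      rw [e1, e2, show start + (c : Int) + 1 = start + ((c + 1 : Nat) : Int) by push_cast; ring,
          show start + (c : Int) + ((x :: t).length : Int) - 1
              = start + ((c + 1 : Nat) : Int) + (t.length : Int) - 1 by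
            push_cast [List.length_cons]; ring]
      exact ih d x start (c + 1)
    · have e1 : pvALoop (x :: t) d cur start (start + c)
          = pvALoop t (d.modify cur [] (fun l => l ++ [(start, start + c - 1)])) x
              (start + c) (start + c + 1) := by
        simp [pvALoop, h]
      have e2 : pvRunsAux cur c (x :: t) = (cur, c) :: pvRunsAux x 1 t := by
        simp [pvRunsAux, h]
      rw [e1, e2]
      simp only [pvIvsOf, List.foldl_cons]
      rw [show start + (c : Int) + 1 = (start + c) + ((1 : Nat) : Int) by push_cast; ring,
          show start + (c : Int) + ((x :: t).length : Int) - 1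
              = (start + c) + ((1 : Nat) : Int) + (t.length : Int) - 1 by
            push_cast [List.length_cons]; ring]
      have := ih (d.modify cur [] (fun l => l ++ [(start, start + c - 1)])) x (start + (c : Int)) 1
      rw [show ((1:Nat):Int) = (1:Int) by norm_num] at this ⊢
      exact this

-- ---- run-structure facts ----

theorem pvRunsAux_head (k : String) (c : Nat) (xs : List String) :
    ∃ c' rest, pvRunsAux k c xs = (k, c') :: rest := by
  induction xs generalizing c with
  | nil => exact ⟨c, [], rfl⟩
  | cons x t ih =>
    by_cases h : x = k
    · subst h; simpa [pvRunsAux] using ih (c + 1)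
    · exact ⟨c, pvRunsAux x 1 t, by simp [pvRunsAux, h]⟩

theorem pvRunsAux_chain (k : String) (c : Nat) (xs : List String) :
    (pvRunsAux k c xs).IsChain (fun p q => p.1 ≠ q.1) := by
  induction xs generalizing k c with
  | nil => simp [pvRunsAux]
  | cons x t ih =>
    by_cases h : x = k
    · subst h; simpa [pvRunsAux] using ih x (c + 1)
    · simp only [pvRunsAux, h, if_false]
      obtain ⟨c', rest, he⟩ := pvRunsAux_head x 1 t
      rw [he, List.isChain_cons_cons]
      exact ⟨fun hc => h (by simpa using hc.symm), he ▸ ih x 1⟩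

theorem pvRunsAux_pos (k : String) (c : Nat) (xs : List String) (hc : 1 ≤ c) :
    ∀ p ∈ pvRunsAux k c xs, 1 ≤ p.2 := by
  induction xs generalizing k c with
  | nil => intro p hp; simp [pvRunsAux] at hp; subst hp; exact hc
  | cons x t ih =>
    intro p hp
    by_cases h : x = k
    · subst h; exact ih x (c + 1) (by omega) p (by simpa [pvRunsAux] using hp)
    · simp only [pvRunsAux, h, if_false, List.mem_cons] at hp
      rcases hp with hp | hp
      · subst hp; exact hc
      · exact ih x 1 le_rfl p hp

theorem pvExpand_runsAux (k : String) (c : Nat) (xs : List String) :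
    pvExpand (pvRunsAux k c xs) = List.replicate c k ++ xs := by
  induction xs generalizing k c with
  | nil => simp [pvRunsAux, pvExpand]
  | cons x t ih =>
    by_cases h : x = k
    · subst h
      have e : pvRunsAux x c (x :: t) = pvRunsAux x (c + 1) t := by simp [pvRunsAux]
      rw [e, ih x (c + 1), List.replicate_succ']
      simp
    · simp only [pvRunsAux, h, if_false, pvExpand, List.flatMap_cons]
      rw [show (pvRunsAux x 1 t).flatMap (fun p => List.replicate p.2 p.1) = pvExpand (pvRunsAux x 1 t) from rfl,
        ih x 1]
      simp

theorem pvIvsOf_keys (idx : Int) (rs : List (String × Nat)) :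
    (pvIvsOf idx rs).map (·.1) = rs.map (·.1) := by
  induction rs generalizing idx with
  | nil => rfl
  | cons p rs ih => obtain ⟨a, b⟩ := p; simp [pvIvsOf, ih]

theorem pv_add_idem {α : Type} [BEq α] [LawfulBEq α] (s : PySem.Set α) (x : α) :
    (s.add x).add x = s.add x := by
  have h2 : PySem.Set.contains (s.add x) x = true := by
    simp [PySem.Set.contains, PySem.Set.mem_add]
  rw [show (s.add x).add x = if (s.add x).contains x then s.add x else (s.add x) ++ [x] from rfl,
    if_pos h2]

theorem pv_foldl_add_replicate {α : Type} [BEq α] [LawfulBEq α] (n : Nat) (hn : 1 ≤ n)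
    (s : PySem.Set α) (x : α) :
    (List.replicate n x).foldl PySem.Set.add s = s.add x := by
  induction n generalizing s with
  | zero => omega
  | succ m ih =>
    rcases Nat.eq_zero_or_pos m with hm | hm
    · subst hm; simp [List.replicate]
    · rw [List.replicate_succ, List.foldl_cons, ih hm]
      exact pv_add_idem s x

theorem pvKeyset (rs : List (String × Nat)) (hpos : ∀ p ∈ rs, 1 ≤ p.2) :
    PySem.Set.ofList (pvExpand rs) = PySem.Set.ofList (rs.map (·.1)) := by
  have main : ∀ (rs : List (String × Nat)), (∀ p ∈ rs, 1 ≤ p.2) → ∀ (s : PySem.Set String),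
      (pvExpand rs).foldl PySem.Set.add s = (rs.map (·.1)).foldl PySem.Set.add s := by
    intro rs
    induction rs with
    | nil => intro _ s; rfl
    | cons p rs ih =>
      intro hpos s
      obtain ⟨a, b⟩ := p
      simp only [pvExpand, List.flatMap_cons, List.foldl_append, List.map_cons, List.foldl_cons]
      rw [pv_foldl_add_replicate b (hpos (a, b) (by simp)) s a]
      exact ih (fun q hq => hpos q (by simp [hq])) (s.add a)
  rw [PySem.Set.ofList_eq_foldl, PySem.Set.ofList_eq_foldl]
  exact main rs hpos PySem.Set.empty

-- the first index of a block, then the rest of the block shifted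
theorem pvRangeCons (m : Nat) (a : Int) :
    (List.range (m + 1)).map (fun (j : Nat) => a + (j : Int))
      = a :: (List.range m).map (fun (j : Nat) => a + 1 + (j : Int)) := by
  rw [List.range_succ_eq_map, List.map_cons, List.map_map]
  congr 1
  · simp
  · apply List.map_congr_left
    intro j _
    simp only [Function.comp_apply]
    push_cast
    ring

theorem pvE0 (k k' : String) (n : Nat) : ∀ (s : Int),
    ((((PySem.List.enumerate (List.replicate n k') s).map (fun p => (p.2, p.1))).filter
        (fun q => q.1 == k)).map (·.2))
      = if k' = k then (List.range n).map (fun (j : Nat) => s + (j : Int)) else [] := by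
  induction n with
  | zero => intro s; simp
  | succ m ih =>
    intro s
    rw [List.replicate_succ, PySem.List.enumerate_cons, List.map_cons]
    by_cases h : k' = k
    · subst h
      rw [List.filter_cons_of_pos (by simp), List.map_cons, ih (s + 1), if_pos rfl, if_pos rfl,
          pvRangeCons m s]
    · rw [List.filter_cons_of_neg (by simpa using h), ih (s + 1), if_neg h, if_neg h]

theorem pvPairsFilter (k : String) (rs : List (String × Nat)) : ∀ (s : Int),
    ((((PySem.List.enumerate (pvExpand rs) s).map (fun p => (p.2, p.1))).filter
        (fun q => q.1 == k)).map (·.2)) = pvIdxsOf k s rs := by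
  induction rs with
  | nil => intro s; simp [pvExpand, pvIdxsOf]
  | cons p rs ih =>
    intro s
    obtain ⟨k', n⟩ := p
    have he : pvExpand ((k', n) :: rs) = List.replicate n k' ++ pvExpand rs := by
      simp [pvExpand]
    rw [he, PySem.List.enumerate_append]
    simp only [List.map_append, List.filter_append, List.map_append]
    rw [pvE0, List.length_replicate, ih (s + n)]
    simp [pvIdxsOf]

theorem pvBlock (m : Nat) (rest : List Int) (ivs : List (Int × Int)) : ∀ (s p : Int),
    pvGroupAux ivs s p (((List.range m).map (fun (j : Nat) => p + 1 + (j : Int))) ++ rest)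
      = pvGroupAux ivs s (p + m) rest := by
  induction m generalizing ivs with
  | zero => intro s p; simp
  | succ m ih =>
    intro s p
    rw [pvRangeCons m (p + 1), List.cons_append]
    rw [show pvGroupAux ivs s p ((p + 1) :: ((List.range m).map (fun (j : Nat) => p + 1 + 1 + (j : Int)) ++ rest))
        = pvGroupAux ivs s (p + 1) ((List.range m).map (fun (j : Nat) => (p + 1) + 1 + (j : Int)) ++ rest) by
      simp [pvGroupAux]]
    rw [ih ivs s (p + 1), show (p + 1) + (m : Int) = p + ((m + 1 : Nat) : Int) by push_cast; ring]

theorem pvGroupMain (k : String) (rs : List (String × Nat)) :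
    ∀ (idx : Int) (ivs : List (Int × Int)) (start prev : Int),
    rs.IsChain (fun p q => p.1 ≠ q.1) → (∀ p ∈ rs, 1 ≤ p.2) → prev < idx →
    (∀ n rs', rs = (k, n) :: rs' → prev + 1 < idx) →
    pvGroupAux ivs start prev (pvIdxsOf k idx rs)
      = ivs ++ [(start, prev)] ++ ((pvIvsOf idx rs).filter (fun p => p.1 == k)).map (·.2) := by
  induction rs with
  | nil => intro idx ivs start prev _ _ _ _; simp [pvIdxsOf, pvIvsOf, pvGroupAux]
  | cons p rs ih =>
    intro idx ivs start prev hch hpos hlt hgap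
    obtain ⟨k', n⟩ := p
    have hn : 1 ≤ n := hpos (k', n) (by simp)
    obtain ⟨m, rfl⟩ : ∃ m, n = m + 1 := ⟨n - 1, by omega⟩
    have hch' : rs.IsChain (fun p q => p.1 ≠ q.1) := hch.tail
    have hpos' : ∀ p ∈ rs, 1 ≤ p.2 := fun q hq => hpos q (by simp [hq])
    by_cases h : k' = k
    · have hg : prev + 1 < idx := hgap (m + 1) rs (by rw [h])
      rw [show pvIdxsOf k idx ((k', m + 1) :: rs)
            = (List.range (m + 1)).map (fun (j : Nat) => idx + (j : Int))
              ++ pvIdxsOf k (idx + ((m + 1 : Nat) : Int)) rs by simp [pvIdxsOf, h]]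
      rw [pvRangeCons m idx, List.cons_append]
      rw [show pvGroupAux ivs start prev (idx :: ((List.range m).map (fun (j : Nat) => idx + 1 + (j : Int))
              ++ pvIdxsOf k (idx + ((m + 1 : Nat) : Int)) rs))
            = pvGroupAux (ivs ++ [(start, prev)]) idx idx ((List.range m).map (fun (j : Nat) => idx + 1 + (j : Int))
              ++ pvIdxsOf k (idx + ((m + 1 : Nat) : Int)) rs) by
        simp [pvGroupAux]; omega]
      rw [pvBlock m _ _ idx idx]
      have hgap' : ∀ n' rs'', rs = (k, n') :: rs'' → (idx + (m : Int)) + 1 < idx + ((m + 1 : Nat) : Int) := by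
        intro n' rs'' he
        exfalso
        rw [he, List.isChain_cons_cons] at hch
        exact hch.1 (by simpa using h)
      rw [ih (idx + ((m + 1 : Nat) : Int)) (ivs ++ [(start, prev)]) idx (idx + (m : Int)) hch' hpos'
        (by push_cast; omega) hgap']
      rw [show pvIvsOf idx ((k', m + 1) :: rs)
            = (k', (idx, idx + ((m + 1 : Nat) : Int) - 1)) :: pvIvsOf (idx + ((m + 1 : Nat) : Int)) rs from rfl]
      rw [List.filter_cons_of_pos (by simp [h]), List.map_cons]
      have : idx + ((m + 1 : Nat) : Int) - 1 = idx + (m : Int) := by push_cast; ring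
      rw [this]
      simp
    · rw [show pvIdxsOf k idx ((k', m + 1) :: rs)
            = pvIdxsOf k (idx + ((m + 1 : Nat) : Int)) rs by simp [pvIdxsOf, h]]
      rw [ih (idx + ((m + 1 : Nat) : Int)) ivs start prev hch' hpos'
        (by push_cast; omega) (by intro n' rs'' he; push_cast; omega)]
      rw [show pvIvsOf idx ((k', m + 1) :: rs)
            = (k', (idx, idx + ((m + 1 : Nat) : Int) - 1)) :: pvIvsOf (idx + ((m + 1 : Nat) : Int)) rs from rfl]
      rw [List.filter_cons_of_neg (by simpa using h)]

theorem pvGroupTop (k : String) (rs : List (String × Nat)) :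
    ∀ (idx : Int), rs.IsChain (fun p q => p.1 ≠ q.1) → (∀ p ∈ rs, 1 ≤ p.2) →
    k ∈ rs.map (·.1) →
    pvGroup (pvIdxsOf k idx rs) = ((pvIvsOf idx rs).filter (fun p => p.1 == k)).map (·.2) := by
  induction rs with
  | nil => intro idx _ _ hk; simp at hk
  | cons p rs ih =>
    intro idx hch hpos hk
    obtain ⟨k', n⟩ := p
    have hn : 1 ≤ n := hpos (k', n) (by simp)
    obtain ⟨m, rfl⟩ : ∃ m, n = m + 1 := ⟨n - 1, by omega⟩
    have hch' : rs.IsChain (fun p q => p.1 ≠ q.1) := hch.tail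
    have hpos' : ∀ p ∈ rs, 1 ≤ p.2 := fun q hq => hpos q (by simp [hq])
    by_cases h : k' = k
    · rw [show pvIdxsOf k idx ((k', m + 1) :: rs)
            = (List.range (m + 1)).map (fun (j : Nat) => idx + (j : Int))
              ++ pvIdxsOf k (idx + ((m + 1 : Nat) : Int)) rs by simp [pvIdxsOf, h]]
      rw [pvRangeCons m idx, List.cons_append]
      rw [show pvGroup (idx :: ((List.range m).map (fun (j : Nat) => idx + 1 + (j : Int))
              ++ pvIdxsOf k (idx + ((m + 1 : Nat) : Int)) rs))
            = pvGroupAux [] idx idx ((List.range m).map (fun (j : Nat) => idx + 1 + (j : Int))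
              ++ pvIdxsOf k (idx + ((m + 1 : Nat) : Int)) rs) from rfl]
      rw [pvBlock m _ _ idx idx]
      have hgap' : ∀ n' rs'', rs = (k, n') :: rs'' → (idx + (m : Int)) + 1 < idx + ((m + 1 : Nat) : Int) := by
        intro n' rs'' he
        exfalso
        rw [he, List.isChain_cons_cons] at hch
        exact hch.1 (by simpa using h)
      rw [pvGroupMain k rs (idx + ((m + 1 : Nat) : Int)) [] idx (idx + (m : Int)) hch' hpos'
        (by push_cast; omega) hgap']
      rw [show pvIvsOf idx ((k', m + 1) :: rs)
            = (k', (idx, idx + ((m + 1 : Nat) : Int) - 1)) :: pvIvsOf (idx + ((m + 1 : Nat) : Int)) rs from rfl]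
      rw [List.filter_cons_of_pos (by simp [h]), List.map_cons]
      have : idx + ((m + 1 : Nat) : Int) - 1 = idx + (m : Int) := by push_cast; ring
      rw [this]
      simp
    · rw [show pvIdxsOf k idx ((k', m + 1) :: rs)
            = pvIdxsOf k (idx + ((m + 1 : Nat) : Int)) rs by simp [pvIdxsOf, h]]
      have hk' : k ∈ rs.map (·.1) := by
        rcases List.mem_cons.mp hk with he | hm
        · exact absurd he.symm h
        · exact hm
      rw [ih (idx + ((m + 1 : Nat) : Int)) hch' hpos' hk']
      rw [show pvIvsOf idx ((k', m + 1) :: rs)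
            = (k', (idx, idx + ((m + 1 : Nat) : Int) - 1)) :: pvIvsOf (idx + ((m + 1 : Nat) : Int)) rs from rfl]
      rw [List.filter_cons_of_neg (by simpa using h)]



-- ===== VERDICT (by name: the statement is the Claim_ definition above) =====
theorem get_activity_intervals_spec : Claim_equal_get_activity_intervals := by
  intro labels _ hpre
  unfold Spec_get_activity_intervals
  match labels, hpre with
  | x :: xs, _ =>
    unfold get_activity_intervals get_activity_intervals_alt
    -- ===== A side: loop = group-by fold over the run intervals =====
    have h0 : (PySem.List.pyGet? (x :: xs) (0 : Int)).getD "" = x := by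
      simp [pysem]
    have hfold := pvALoop_eq_foldl (x :: xs) 1 (by simp) PySem.Dict.empty x 0
    simp only [List.drop_one, List.tail_cons] at hfold
    rw [show ((1 : Nat) : Int) = (1 : Int) from rfl] at hfold
    have hmain := pvMainA xs PySem.Dict.empty x 0 1
    rw [show (0 : Int) + ((1 : Nat) : Int) = (1 : Int) by norm_num] at hmain
    simp only [h0]
    rw [hfold]
    rw [show (((x :: xs).length : Int)) - 1 = 0 + ((1 : Nat) : Int) + (xs.length : Int) - 1 by
      push_cast [List.length_cons]; ring]
    rw [show (0 : Int) + ((1 : Nat) : Int) = (1 : Int) by norm_num]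
    rcases hst : pvALoop xs PySem.Dict.empty x 0 1 with ⟨d', cur', start'⟩
    rw [hst] at hmain
    simp only at hmain
    have hmain2 : (d'.modify cur' [] fun l => l ++ [(start', 1 + (xs.length : Int) - 1)])
        = pvG (pvIvsOf 0 (pvRunsAux x 1 xs)) := hmain
    rw [pv_flushA, hmain2]
    -- ===== B side: stage 1 is the group-by fold over the swapped enumeration =====
    have hposeq : (PySem.List.enumerate (x :: xs) 0).foldl pvPosStep PySem.Dict.empty
        = pvG ((PySem.List.enumerate (x :: xs) 0).map (fun p => (p.2, p.1))) := by
      unfold pvG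
      rw [List.foldl_map]
      apply PySem.List.foldl_congr_mem
      intro acc p _
      exact pv_sd_modify acc p.2 _
    rw [hposeq]
    -- stage 2: inserting the grouped values over distinct fresh keys is a map on items
    have hnodup : ((pvG ((PySem.List.enumerate (x :: xs) 0).map (fun p => (p.2, p.1)))).items.map
        (fun kv => kv.1)).Nodup := by
      rw [pvG_items]
      simp [List.map_map, Function.comp_def, PySem.Set.nodup_ofList]
    have hins := PySem.Dict.items_foldl_insert_fresh
        (pvG ((PySem.List.enumerate (x :: xs) 0).map (fun p => (p.2, p.1)))).items
        (fun kv => kv.1) (fun kv => pvGroup kv.2) PySem.Dict.empty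
        (fun a _ => by simp [PySem.Dict.contains, PySem.Dict.empty]) hnodup
    rw [hins]
    rw [show (PySem.Dict.empty : PySem.Dict String (List (Int × Int))).items = [] from rfl,
      List.nil_append]
    -- rewrite both sides through the items characterisation
    rw [pvG_items, pvG_items, pvIvsOf_keys]
    simp only [List.map_map, Function.comp_def]
    -- the key lists agree
    have hpos1 : ∀ p ∈ pvRunsAux x 1 xs, 1 ≤ p.2 := pvRunsAux_pos x 1 xs le_rfl
    have hexp : pvExpand (pvRunsAux x 1 xs) = x :: xs := by
      rw [pvExpand_runsAux]; rfl
    have hmfst : (PySem.List.enumerate (x :: xs) 0).map (fun q => q.2) = x :: xs :=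
      PySem.List.map_snd_enumerate (x :: xs) 0
    rw [hmfst, show (x :: xs) = pvExpand (pvRunsAux x 1 xs) from hexp.symm,
      pvKeyset (pvRunsAux x 1 xs) hpos1]
    -- and so do the per-key values
    apply List.map_congr_left
    intro k hk
    have hk' : k ∈ (pvRunsAux x 1 xs).map (·.1) := (PySem.Set.mem_ofList _ _).mp hk
    rw [pvPairsFilter k (pvRunsAux x 1 xs) 0,
      pvGroupTop k (pvRunsAux x 1 xs) 0 (pvRunsAux_chain x 1 xs) hpos1 hk']
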